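-- pv_equiv track=rewrite | github.com/phuc-hyphen/Python_exercices | Graphe/tp4support.py | SA_is_augmenting_path
-- ===== SOURCE A (Python) =====
-- def SA_is_alternating_path(n, edges, matching, pairs):  # pairs is a list of edges, is it an alternating path?
--     def edge_equal(edge1, edge2):
--         if edge1 == edge2:
--             return True
--         else:
--             (a, b) = edge1
--             return (b, a) == edge2
--
--     def find_edge(edge, edges):
--         # find the first edge in edges edge_equal to the given edge
--         #  or None if there isn't one
--         return next((edge2 for edge2 in edges if edge_equal(edge, edge2)), None)
--
--     def are_edges_incident(edge1, edge2):
--         (a, b) = edge1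
--         return a in edge2 or b in edge2
--
--     def is_path(n, edges, path):  # is path a valid path?
--         # i.e., is every element of path an edge in the sense of edge_equal ?
--         # and are consecutive edges adjacent ?
--         for pair in path:
--             if not next((edge for edge in edges if edge_equal(edge, pair)), False):
--                 return False
--         for i in range(len(path) - 1):
--             if not are_edges_incident(path[i], path[i + 1]):
--                 return False
--         return True
--
--     if pairs == []:
--         return True  # TODO, not sure whether this is correct
--     if not is_path(n, edges, pairs):
--         return False
--     expected_parity = find_edge(pairs[0], matching) != None
--     for pair in pairs:
--         parity = find_edge(pair, matching) != None
--         if parity != expected_parity: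
--             return False
--         expected_parity = not parity
--     return True
--
-- def SA_is_augmenting_path(n, edges, matching, path):
--     # path is a list of verticies
--     # matching is a list of edges, in the sense of edge_equal
--
--     def path_to_pairs(path):  # return a list of pairs of points, presumably edges
--         def loop(i, pairs):
--             if i == len(path) - 1:
--                 return pairs
--             else:
--                 return loop(i + 1, pairs + [(path[i], path[i + 1])])
--
--         return loop(0, [])
--
--     def is_free_vertex(n, matching, v):
--         # we assume that matching is a valid matching (without verifying)
--         #  is v a vertex of the graph which is not adjacent to any edge in the matching
--         if v < 0:
--             return False
--         if v >= n:
--             return False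
--         for (a, b) in matching:
--             if a == v or b == v:
--                 return False
--         return True
--
--     if len(path) % 2 == 1:
--         return False
--     if path == []:
--         return False
--     return is_free_vertex(n, matching, path[0]) \
--            and is_free_vertex(n, matching, path[len(path) - 1]) \
--            and SA_is_alternating_path(n, edges, matching, path_to_pairs(path))
-- ===== SOURCE B (Python) =====
-- def SA_is_augmenting_path(n, edges, matching, path):
--     # One pass: precomputed matched-vertex set and normalized edge/matching sets,
--     # then a single scan over consecutive vertex pairs with an alternating parity flag.
--     if path == [] or len(path) % 2 == 1:
--         return False
--     matched = {v for e in matching for v in e}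
--     edge_set = {frozenset(e) for e in edges}
--     match_set = {frozenset(e) for e in matching}
--     first, last = path[0], path[-1]
--     if not (0 <= first < n and 0 <= last < n):
--         return False
--     if first in matched or last in matched:
--         return False
--     expected = frozenset(path[0:2]) in match_set
--     for u, v in zip(path, path[1:]):
--         fs = frozenset((u, v))
--         if fs not in edge_set:
--             return False
--         if (fs in match_set) != expected:
--             return False
--         expected = not expected
--     return True
-- ===== Notes on version B (the rewrite author's own statement) =====
-- stated objective: simpler
-- what changed: B precomputes a matched-vertex set and normalized (frozenset) edge/matching sets once, then checks everything in a single pass over zip(path, path[1:]) with an alternating parity flag, replacing A's pair-list construction plus three separate scans (edge lookup per pair, incidence loop, parity loop) each doing a linear search of edges/matching.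
import Mathlib
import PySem

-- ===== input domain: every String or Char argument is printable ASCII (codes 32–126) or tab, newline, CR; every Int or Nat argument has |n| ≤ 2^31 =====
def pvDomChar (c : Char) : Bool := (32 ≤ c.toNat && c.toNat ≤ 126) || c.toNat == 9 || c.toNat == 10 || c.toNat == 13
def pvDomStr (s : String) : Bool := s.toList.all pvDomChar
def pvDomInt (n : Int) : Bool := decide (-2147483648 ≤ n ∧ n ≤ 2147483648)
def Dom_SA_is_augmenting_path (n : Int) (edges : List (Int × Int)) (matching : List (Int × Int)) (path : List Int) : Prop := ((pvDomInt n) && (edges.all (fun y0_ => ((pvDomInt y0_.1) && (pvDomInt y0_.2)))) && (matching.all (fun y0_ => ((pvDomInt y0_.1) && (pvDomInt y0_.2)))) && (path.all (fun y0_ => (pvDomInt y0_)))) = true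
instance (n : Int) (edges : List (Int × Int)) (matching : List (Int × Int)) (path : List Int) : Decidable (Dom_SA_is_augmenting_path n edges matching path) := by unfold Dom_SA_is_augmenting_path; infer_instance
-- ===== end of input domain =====

-- B replaces A's three separate scans (path validity, incidence, alternation) by precomputed
-- normalized-edge / matched-vertex sets and one pass over consecutive vertex pairs (objective: simpler).

-- ===== PORT A =====
-- edge_equal(edge1, edge2)
def pvEdgeEqual (e1 e2 : Int × Int) : Bool :=
  if e1 = e2 then true else decide ((e1.2, e1.1) = e2)

-- find_edge(edge, edges): next((e2 for e2 in edges if edge_equal(edge, e2)), None)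
def pvFindEdge? (e : Int × Int) (es : List (Int × Int)) : Option (Int × Int) :=
  es.find? (fun e2 => pvEdgeEqual e e2)

-- are_edges_incident(edge1, edge2): a in edge2 or b in edge2
def pvAreIncident (e1 e2 : Int × Int) : Bool :=
  (e1.1 = e2.1 || e1.1 = e2.2) || (e1.2 = e2.1 || e1.2 = e2.2)

-- is_path(n, edges, path): both for-loops with early return become List.all;
-- path[i] indices are always in range here, so getD's default is never used.
def pvIsPath (edges : List (Int × Int)) (p : List (Int × Int)) : Bool :=
  (p.all fun pair => (edges.find? (fun e => pvEdgeEqual e pair)).isSome) &&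
  ((List.range (p.length - 1)).all fun i =>
    pvAreIncident (p.getD i (0, 0)) (p.getD (i + 1) (0, 0)))

-- the parity loop of SA_is_alternating_path
def pvAltLoop (matching : List (Int × Int)) : List (Int × Int) → Bool → Bool
  | [], _ => true
  | pair :: rest, expected =>
    let parity := (pvFindEdge? pair matching).isSome
    if parity ≠ expected then false else pvAltLoop matching rest (!parity)

-- SA_is_alternating_path(n, edges, matching, pairs); pairs[0] via headD (only read when pairs ≠ [])
def pvIsAlternating (n : Int) (edges matching pairs : List (Int × Int)) : Bool :=
  if pairs = [] then true
  else if !(pvIsPath edges pairs) then false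
  else pvAltLoop matching pairs ((pvFindEdge? (pairs.headD (0, 0)) matching).isSome)

-- path_to_pairs' inner loop(i, pairs); the last branch is a totality guard for an index
-- region Python never reaches from loop(0, []) (it would raise IndexError there).
def pvPathPairsLoop (path : List Int) (i : Nat) (pairs : List (Int × Int)) : List (Int × Int) :=
  if (i : Int) = (path.length : Int) - 1 then pairs
  else if _h : i < path.length - 1 then
    pvPathPairsLoop path (i + 1) (pairs ++ [(path.getD i 0, path.getD (i + 1) 0)])
  else pairs
termination_by path.length - 1 - i
decreasing_by omega

-- is_free_vertex(n, matching, v)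
def pvIsFree (n : Int) (matching : List (Int × Int)) (v : Int) : Bool :=
  if v < 0 then false
  else if v ≥ n then false
  else matching.all fun ab => !(decide (ab.1 = v) || decide (ab.2 = v))

def SA_is_augmenting_path (n : Int) (edges : List (Int × Int)) (matching : List (Int × Int)) (path : List Int) : Bool :=
  if path.length % 2 = 1 then false
  else if path = [] then false
  else pvIsFree n matching (path.getD 0 0)
    && (pvIsFree n matching (path.getD (path.length - 1) 0)
    && pvIsAlternating n edges matching (pvPathPairsLoop path 0 []))

-- ===== PORT B =====
-- frozenset of a pair, as the sorted pair (frozenset equality = normalized-pair equality)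
def pvNorm (e : Int × Int) : Int × Int := if e.1 ≤ e.2 then e else (e.2, e.1)

-- the single scan over zip(path, path[1:]) with the alternating flag
def pvBLoop (edgeSet matchSet : PySem.Set (Int × Int)) : List (Int × Int) → Bool → Bool
  | [], _ => true
  | (u, v) :: rest, expected =>
    let fs := pvNorm (u, v)
    if !(PySem.Set.contains edgeSet fs) then false
    else if (PySem.Set.contains matchSet fs) ≠ expected then false
    else pvBLoop edgeSet matchSet rest (!expected)

def SA_is_augmenting_path_alt (n : Int) (edges : List (Int × Int)) (matching : List (Int × Int)) (path : List Int) : Bool :=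
  match path with
  | [] => false
  | v0 :: rest =>
    if (v0 :: rest).length % 2 = 1 then false
    else
      let matched : PySem.Set Int := PySem.Set.ofList (matching.flatMap fun e => [e.1, e.2])
      let edgeSet : PySem.Set (Int × Int) := PySem.Set.ofList (edges.map pvNorm)
      let matchSet : PySem.Set (Int × Int) := PySem.Set.ofList (matching.map pvNorm)
      let first := v0
      let last := (v0 :: rest).getLast (by simp)
      if !((decide (0 ≤ first) && decide (first < n)) && (decide (0 ≤ last) && decide (last < n))) then false
      else if PySem.Set.contains matched first || PySem.Set.contains matched last then false
      else
        -- frozenset(path[0:2]); for rest = [] this is the singleton {v0}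
        pvBLoop edgeSet matchSet ((v0 :: rest).zip rest)
          (PySem.Set.contains matchSet (pvNorm (v0, rest.headD v0)))

-- ===== PRECONDITION & SPEC =====
def Spec_SA_is_augmenting_path (n : Int) (edges : List (Int × Int)) (matching : List (Int × Int)) (path : List Int) (out : Bool) : Prop := out = SA_is_augmenting_path_alt n edges matching path
instance (n : Int) (edges : List (Int × Int)) (matching : List (Int × Int)) (path : List Int) (out : Bool) : Decidable (Spec_SA_is_augmenting_path n edges matching path out) := by unfold Spec_SA_is_augmenting_path; infer_instance

-- ===== CLAIM (what is proved, stated in full; the proofs are below) =====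
def Claim_equal_SA_is_augmenting_path : Prop := ∀ (n : Int) (edges : List (Int × Int)) (matching : List (Int × Int)) (path : List Int), Dom_SA_is_augmenting_path n edges matching path → Spec_SA_is_augmenting_path n edges matching path (SA_is_augmenting_path n edges matching path)

-- ===== LEMMAS AND PROOFS =====

lemma edgeEqual_iff_norm (e p : Int × Int) : pvEdgeEqual e p = true ↔ pvNorm e = pvNorm p := by
  obtain ⟨a, b⟩ := e; obtain ⟨u, v⟩ := p
  simp [pvEdgeEqual, pvNorm]
  split_ifs <;> simp_all [Prod.ext_iff] <;> omega

lemma pvEdgeEqual_comm (a b : Int × Int) : pvEdgeEqual a b = pvEdgeEqual b a := by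
  rw [Bool.eq_iff_iff, edgeEqual_iff_norm, edgeEqual_iff_norm]
  exact eq_comm

lemma find_contains (p : Int × Int) (es : List (Int × Int)) :
    (es.find? (fun e => pvEdgeEqual e p)).isSome
      = PySem.Set.contains (PySem.Set.ofList (es.map pvNorm)) (pvNorm p) := by
  rw [Bool.eq_iff_iff]
  simp [List.find?_isSome, PySem.Set.mem_ofList, List.mem_map, edgeEqual_iff_norm]

lemma findEdge_contains (p : Int × Int) (es : List (Int × Int)) :
    (pvFindEdge? p es).isSome
      = PySem.Set.contains (PySem.Set.ofList (es.map pvNorm)) (pvNorm p) := by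
  have h := find_contains p es
  rw [show (fun e => pvEdgeEqual e p) = (fun e => pvEdgeEqual p e) from
    funext fun e => pvEdgeEqual_comm e p] at h
  exact h

lemma free_eq (n : Int) (matching : List (Int × Int)) (v : Int) :
    pvIsFree n matching v
      = ((decide (0 ≤ v) && decide (v < n))
          && !(PySem.Set.contains (PySem.Set.ofList (matching.flatMap fun e => [e.1, e.2])) v)) := by
  rw [Bool.eq_iff_iff]
  simp [pvIsFree, PySem.Set.mem_ofList, List.mem_flatMap]
  constructor
  · rintro ⟨h1, h2, h3⟩
    exact ⟨⟨h1, h2⟩, fun a b hab =>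
      ⟨fun e => ((h3 a b hab).1) e.symm, fun e => ((h3 a b hab).2) e.symm⟩⟩
  · rintro ⟨⟨h1, h2⟩, h3⟩
    exact ⟨h1, h2, fun a b hab =>
      ⟨fun e => ((h3 a b hab).1) e.symm, fun e => ((h3 a b hab).2) e.symm⟩⟩

lemma pairsLoop_eq (path : List Int) :
    ∀ k i, k = path.length - 1 - i → i < path.length → ∀ pairs,
      pvPathPairsLoop path i pairs = pairs ++ (path.drop i).zip (path.drop (i + 1)) := by
  intro k
  induction k with
  | zero =>
    intro i hk hi pairs
    rw [pvPathPairsLoop]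
    have h1 : (i : Int) = (path.length : Int) - 1 := by omega
    have h2 : path.drop (i + 1) = [] := List.drop_eq_nil_of_le (by omega)
    simp [h1, h2]
  | succ k ih =>
    intro i hk hi pairs
    rw [pvPathPairsLoop]
    have h1 : ¬ ((i : Int) = (path.length : Int) - 1) := by omega
    have h2 : i < path.length - 1 := by omega
    simp only [h1, if_false, h2, dif_pos]
    rw [ih (i + 1) (by omega) (by omega)]
    rw [List.append_assoc]
    congr 1
    have hi1 : i + 1 < path.length := by omega
    simp only [List.getD_eq_getElem?_getD, List.getElem?_eq_getElem hi,
      List.getElem?_eq_getElem hi1, Option.getD_some, List.singleton_append,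
      List.drop_eq_getElem_cons hi, List.drop_eq_getElem_cons hi1, List.zip_cons_cons]

lemma loop_fusion (edges matching : List (Int × Int)) :
    ∀ (zs : List (Int × Int)) (exp : Bool),
      pvBLoop (PySem.Set.ofList (edges.map pvNorm)) (PySem.Set.ofList (matching.map pvNorm)) zs exp
        = ((zs.all fun pair => (edges.find? (fun e => pvEdgeEqual e pair)).isSome)
            && pvAltLoop matching zs exp) := by
  intro zs
  induction zs with
  | nil => intro exp; simp [pvBLoop, pvAltLoop]
  | cons hd tl ih =>
    obtain ⟨u, v⟩ := hd
    intro exp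
    have hsw : (fun e => pvEdgeEqual e (u, v)) = (fun e => pvEdgeEqual (u, v) e) :=
      funext fun e => pvEdgeEqual_comm e (u, v)
    simp only [pvBLoop, pvAltLoop, pvFindEdge?, List.all_cons, ← find_contains, hsw]
    by_cases he : (edges.find? (fun e => pvEdgeEqual (u, v) e)).isSome
    · by_cases hp : ((matching.find? (fun e => pvEdgeEqual (u, v) e)).isSome) = exp
      · simp [he, hp, ih]
      · simp [he, hp]
    · simp [he]

lemma incident_all (path : List Int) :
    ((List.range ((path.zip path.tail).length - 1)).all fun i =>
      pvAreIncident ((path.zip path.tail).getD i (0, 0)) ((path.zip path.tail).getD (i + 1) (0, 0))) = true := by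
  rw [List.all_eq_true]
  intro i hi
  rw [List.mem_range] at hi
  have hlen : (path.zip path.tail).length = path.length - 1 := by
    simp [List.length_zip, List.length_tail]
  have h1 : i < (path.zip path.tail).length := by omega
  have h2 : i + 1 < (path.zip path.tail).length := by omega
  have hp1 : i + 1 < path.length := by omega
  have hp2 : i + 2 < path.length := by omega
  simp only [List.getD_eq_getElem?_getD, List.getElem?_eq_getElem h1,
    List.getElem?_eq_getElem h2, Option.getD_some, List.getElem_zip, List.getElem_tail]
  simp [pvAreIncident]

-- ===== VERDICT (by name: the statement is the Claim_ definition above) =====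
-- the guard / conjunction shapes of A and B agree
lemma guard_shape (b0 bL m0 mL L : Bool) :
    ((b0 && !m0) && ((bL && !mL) && L))
      = (if !(b0 && bL) then false else if m0 || mL then false else L) := by
  cases b0 <;> cases bL <;> cases m0 <;> cases mL <;> cases L <;> rfl

lemma if_not_and (c L : Bool) : (if !c then false else L) = (c && L) := by
  cases c <;> cases L <;> rfl

-- ===== VERDICT (by name: the statement is the Claim_ definition above) =====
theorem SA_is_augmenting_path_spec : Claim_equal_SA_is_augmenting_path := by
  intro n edges matching path _
  unfold Spec_SA_is_augmenting_path
  match path with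
  | [] => rfl
  | v0 :: rest =>
    by_cases hodd : (v0 :: rest).length % 2 = 1
    · simp only [SA_is_augmenting_path, SA_is_augmenting_path_alt]
      rw [if_pos hodd, if_pos hodd]
    · match rest with
      | [] => simp at hodd
      | r0 :: rest' =>
        have hlen : 0 < (v0 :: r0 :: rest').length := by simp
        have hpairs : pvPathPairsLoop (v0 :: r0 :: rest') 0 [] =
            (v0 :: r0 :: rest').zip (r0 :: rest') :=
          pairsLoop_eq _ _ 0 rfl hlen []
        simp only [SA_is_augmenting_path, SA_is_augmenting_path_alt]
        rw [if_neg hodd, if_neg hodd, if_neg (by simp : ¬ (v0 :: r0 :: rest' : List Int) = [])]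
        rw [hpairs]
        have hz : (v0 :: r0 :: rest').zip (r0 :: rest') = (v0, r0) :: ((r0 :: rest').zip rest') := rfl
        have hinc := incident_all (v0 :: r0 :: rest')
        simp only [List.tail_cons, hz] at hinc
        rw [hz]
        rw [pvIsAlternating, if_neg (by simp), pvIsPath]
        rw [hinc, Bool.and_true, if_not_and]
        rw [show ((v0, r0) :: ((r0 :: rest').zip rest')).headD (0, 0) = (v0, r0) from rfl]
        rw [← loop_fusion, findEdge_contains]
        rw [free_eq, free_eq]
        rw [show (v0 :: r0 :: rest').getD 0 0 = v0 from rfl]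
        rw [show ((r0 :: rest') : List Int).headD v0 = r0 from rfl]
        have hlast : (v0 :: r0 :: rest').getD ((v0 :: r0 :: rest').length - 1) 0
            = (v0 :: r0 :: rest').getLast (by simp) := by
          simp [List.getD_eq_getElem?_getD, List.getLast_eq_getElem]
        rw [hlast]
        rw [guard_shape]
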